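-- pv_equiv track=rewrite | github.com/SiddharthaPramanik/Hacker-Rank | Problem-Solving/Algorithm/equalize-the-array.py | equalizeArray
-- ===== SOURCE A (Python) =====
-- def equalizeArray(arr):
--
--     count = {}
--
--     for n in arr:
--         if n in count:
--             count[n] += 1
--         else:
--             count[n] = 1
--     remove_elements = list(filter(lambda n : n != max(count, key=count.get), arr))
--     return len(remove_elements)
-- ===== SOURCE B (Python) =====
-- def equalizeArray(arr):
--     best = 0
--     run = 0
--     prev = None
--     for x in sorted(arr):
--         run = run + 1 if x == prev else 1
--         prev = x
--         if run > best:
--             best = run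
--     return len(arr) - best
-- ===== Notes on version B (the rewrite author's own statement) =====
-- stated objective: faster
-- what changed: Replaces the frequency-dictionary plus a filter that recomputes max(count, key=count.get) for every element with a sort followed by one linear scan of runs of equal adjacent elements, returning len(arr) minus the longest run.
import Mathlib
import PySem

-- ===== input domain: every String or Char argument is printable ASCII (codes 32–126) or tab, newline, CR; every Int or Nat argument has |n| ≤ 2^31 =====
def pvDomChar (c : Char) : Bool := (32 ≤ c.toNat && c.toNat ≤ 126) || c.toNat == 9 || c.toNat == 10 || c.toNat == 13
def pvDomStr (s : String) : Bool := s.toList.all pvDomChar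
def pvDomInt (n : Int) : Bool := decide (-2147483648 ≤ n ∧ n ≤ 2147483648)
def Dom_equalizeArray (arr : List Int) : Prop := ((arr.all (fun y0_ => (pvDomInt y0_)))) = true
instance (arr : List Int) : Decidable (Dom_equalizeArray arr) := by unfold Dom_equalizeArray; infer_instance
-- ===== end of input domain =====

-- B replaces A's frequency dict + per-element recomputation of max(count, key=count.get) by sort + one run-length scan.

-- ===== PORT A =====
-- Builds the frequency dict, then filters out elements equal to max(count, key=count.get).
-- Python evaluates max(...) inside the filter lambda; for arr = [] the lambda is never called,
-- so the `.getD 0` default on max? is unreachable there (filter over [] is []), matching Python exactly.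
def equalizeArray (arr : List Int) : Int :=
  let count : PySem.Dict Int Int :=
    arr.foldl (fun d n => if d.contains n then d.insert n (d.getD n 0 + 1) else d.insert n 1)
      PySem.Dict.empty
  let remove_elements :=
    arr.filter (fun n => n != (PySem.List.max? count.keys (fun k => count.getD k 0)).getD 0)
  (remove_elements.length : Int)

-- ===== PORT B =====
-- sorted(arr), then one pass maintaining (best, run, prev); returns len(arr) - best.
def equalizeArray_alt (arr : List Int) : Int :=
  let st :=
    (PySem.List.sorted arr (fun x => x) false).foldl
      (fun (st : Int × Int × Option Int) x =>
        let run := if some x == st.2.2 then st.2.1 + 1 else 1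
        (if run > st.1 then run else st.1, run, some x))
      (0, 0, none)
  (arr.length : Int) - st.1

-- ===== PRECONDITION & SPEC =====
def Spec_equalizeArray (arr : List Int) (out : Int) : Prop := out = equalizeArray_alt arr
instance (arr : List Int) (out : Int) : Decidable (Spec_equalizeArray arr out) := by unfold Spec_equalizeArray; infer_instance

-- ===== CLAIM (what is proved, stated in full; the proofs are below) =====
def Claim_equal_equalizeArray : Prop := ∀ (arr : List Int), Dom_equalizeArray arr → Spec_equalizeArray arr (equalizeArray arr)

-- ===== LEMMAS AND PROOFS =====

-- B's loop body, named for the invariant proof (definitionally the lambda in equalizeArray_alt).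
def pvStep : (Int × Int × Option Int) → Int → (Int × Int × Option Int) :=
  fun st x =>
    let run := if some x == st.2.2 then st.2.1 + 1 else 1
    (if run > st.1 then run else st.1, run, some x)

-- A's branching dict-update loop is exactly the Counter loop.
theorem pvCountFold (arr : List Int) :
    arr.foldl (fun d n => if d.contains n then d.insert n (d.getD n 0 + 1) else d.insert n 1)
      PySem.Dict.empty = PySem.Dict.counter arr := by
  have h : (fun (d : PySem.Dict Int Int) n => if d.contains n then d.insert n (d.getD n 0 + 1) else d.insert n 1)
      = fun d n => d.insert n (d.getD n 0 + 1) := by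
    funext d n
    by_cases h : d.contains n = true
    · simp [h]
    · rw [if_neg (by simp [h]),
        PySem.Dict.getD_of_not_contains (h := Bool.not_eq_true _ ▸ (eq_false_of_ne_true h))]
      norm_num
  rw [h, PySem.Dict.foldl_insert_getD_add_one_eq_counter]

-- Removing every element equal to m leaves length - count m elements.
theorem pvFilterNeLength (l : List Int) (m : Int) :
    (l.filter (fun n => n != m)).length = l.length - l.count m := by
  induction l with
  | nil => rfl
  | cons a t ih =>
    have hc : t.count m ≤ t.length := List.count_le_length
    by_cases h : a = m
    · rw [List.filter_cons_of_neg (by simp [h]), List.length_cons, h,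
        List.count_cons_self, ih]
      omega
    · rw [List.filter_cons_of_pos (by simp [h]), List.length_cons, List.length_cons,
        List.count_cons_of_ne h, ih]
      omega

-- B's scan invariant over a sorted (Pairwise ≤) list: the tracked run equals the count of the
-- current (maximal) element, and best is the count of some element and bounds every count.
theorem pvScanInv (s : List Int) (hs : s.Pairwise (· ≤ ·)) :
    (s = [] → s.foldl pvStep (0, 0, none) = (0, 0, none)) ∧
    (s ≠ [] → ∃ p,
      (s.foldl pvStep (0, 0, none)).2.2 = some p ∧
      p ∈ s ∧ (∀ y ∈ s, y ≤ p) ∧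
      (s.foldl pvStep (0, 0, none)).2.1 = (s.count p : Int) ∧
      (∀ y ∈ s, (s.count y : Int) ≤ (s.foldl pvStep (0, 0, none)).1) ∧
      (∃ w ∈ s, (s.foldl pvStep (0, 0, none)).1 = (s.count w : Int))) := by
  induction s using List.reverseRecOn with
  | nil => exact ⟨fun _ => rfl, fun h => absurd rfl h⟩
  | append_singleton t x ih =>
    rw [List.pairwise_append] at hs
    obtain ⟨ht, -, hle⟩ := hs
    have hle' : ∀ y ∈ t, y ≤ x := fun y hy => hle y hy x (List.mem_singleton_self x)
    obtain ⟨ihnil, ihcons⟩ := ih ht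
    have hcy : ∀ y : Int, (t ++ [x]).count y = t.count y + (if y = x then 1 else 0) := by
      intro y; by_cases h : y = x
      · simp [List.count_append, h]
      · simp [List.count_append, h, Ne.symm h]
    refine ⟨fun h => absurd h (by simp), fun _ => ?_⟩
    rw [List.foldl_append]
    rcases eq_or_ne t [] with rfl | htne
    · refine ⟨x, ?_⟩
      rw [ihnil rfl]
      simp [pvStep]
    · obtain ⟨p, hprev, hpmem, hpmax, hrun, hbest, w, hwmem, hw⟩ := ihcons htne
      rcases hfold : t.foldl pvStep (0, 0, none) with ⟨b, r, pr⟩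
      rw [hfold] at hprev hrun hw hbest
      dsimp only at hprev hrun hw hbest
      simp only [List.foldl_cons, List.foldl_nil]
      subst hprev
      have hr1 : (1 : Int) ≤ r := by
        rw [hrun]; exact_mod_cast List.one_le_count_iff.mpr hpmem
      have hbr : r ≤ b := hrun ▸ hbest p hpmem
      by_cases hxp : x = p
      · subst hxp
        have hstep : pvStep (b, r, some x) x = (if r + 1 > b then r + 1 else b, r + 1, some x) := by
          simp [pvStep]
        rw [hstep]
        refine ⟨x, rfl, List.mem_append_right _ (List.mem_singleton_self x),
          fun y hy => ?_, ?_, fun y hy => ?_, ?_⟩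
        · rcases List.mem_append.mp hy with h | h
          · exact hle' y h
          · simp at h; omega
        · dsimp only; rw [hrun, hcy x]; push_cast; simp
        · dsimp only
          by_cases hyx : y = x
          · subst hyx
            rw [hcy y]; simp
            rw [← hrun]
            split_ifs <;> omega
          · have hmem : y ∈ t := by
              rcases List.mem_append.mp hy with h | h
              · exact h
              · simp at h; exact absurd h hyx
            have := hbest y hmem
            rw [hcy y]; simp [hyx]
            split_ifs <;> omega
        · dsimp only
          by_cases hgt : r + 1 > b
          · refine ⟨x, List.mem_append_right _ (List.mem_singleton_self x), ?_⟩
            rw [if_pos hgt, hrun, hcy x]; push_cast; simp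
          · have hwx : w ≠ x := by
              intro e; subst e; omega
            refine ⟨w, List.mem_append_left _ hwmem, ?_⟩
            rw [if_neg hgt, hw, hcy w]; simp [hwx]
      · have hxt : x ∉ t := fun hx => hxp (le_antisymm (hle' p hpmem) (hpmax x hx)).symm
        have hstep : pvStep (b, r, some p) x = (if (1 : Int) > b then 1 else b, 1, some x) := by
          simp [pvStep, hxp]
        have h1b : ¬ ((1 : Int) > b) := by omega
        rw [hstep, if_neg h1b]
        refine ⟨x, rfl, List.mem_append_right _ (List.mem_singleton_self x),
          fun y hy => ?_, ?_, fun y hy => ?_, ?_⟩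
        · rcases List.mem_append.mp hy with h | h
          · exact hle' y h
          · simp at h; omega
        · dsimp only; rw [hcy x]; simp [List.count_eq_zero_of_not_mem hxt]
        · dsimp only
          rcases List.mem_append.mp hy with h | h
          · have hyx : y ≠ x := fun e => hxt (e ▸ h)
            rw [hcy y]; simp [hyx]; exact hbest y h
          · simp at h; subst h
            rw [hcy y]; simp [List.count_eq_zero_of_not_mem hxt]; omega
        · refine ⟨w, List.mem_append_left _ hwmem, ?_⟩
          have hwx : w ≠ x := fun e => hxt (e ▸ hwmem)
          rw [hw, hcy w]; simp [hwx]

-- ===== VERDICT (by name: the statement is the Claim_ definition above) =====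
theorem equalizeArray_spec : Claim_equal_equalizeArray := by
  unfold Claim_equal_equalizeArray Spec_equalizeArray
  intro arr _
  rcases eq_or_ne arr [] with rfl | hne
  · rfl
  unfold equalizeArray equalizeArray_alt
  simp only [pvCountFold]
  -- A side: the chosen key m has maximal count
  have hkeys : (PySem.Dict.counter arr).keys = PySem.Set.ofList arr := PySem.Dict.keys_counter arr
  have hknil : (PySem.Dict.counter arr).keys ≠ [] := by
    rw [hkeys]
    intro h
    have := (PySem.Set.mem_ofList arr (arr.head hne)).mpr (List.head_mem hne)
    simp [h] at this
  obtain ⟨m, hm⟩ : ∃ m, PySem.List.max? (PySem.Dict.counter arr).keys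
      (fun k => (PySem.Dict.counter arr).getD k 0) = some m := by
    rcases h : PySem.List.max? (PySem.Dict.counter arr).keys
        (fun k => (PySem.Dict.counter arr).getD k 0) with _ | m
    · exact absurd ((PySem.List.max?_eq_none_iff _ _).mp h) hknil
    · exact ⟨m, rfl⟩
  have hmmem : m ∈ arr := by
    have := PySem.List.max?_mem hm
    rw [hkeys] at this
    exact (PySem.Set.mem_ofList _ _).mp this
  have hmmax : ∀ y ∈ arr, (arr.count y : Int) ≤ (arr.count m : Int) := by
    intro y hy
    have := PySem.List.max?_isMax hm y (by rw [hkeys]; exact (PySem.Set.mem_ofList _ _).mpr hy)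
    simpa [PySem.Dict.getD_counter] using this
  rw [hm]
  simp only [Option.getD_some]
  rw [pvFilterNeLength]
  -- B side: the scan's best equals count m
  have hperm : (PySem.List.sorted arr (fun x => x) false).Perm arr := PySem.List.sorted_perm _ _ _
  have hsnil : PySem.List.sorted arr (fun x => x) false ≠ [] := by
    rw [Ne, PySem.List.sorted_eq_nil_iff]; exact hne
  have hpw : (PySem.List.sorted arr (fun x => x) false).Pairwise (· ≤ ·) :=
    PySem.List.sorted_pairwise arr (fun x => x)
  have hfun : (fun (st : Int × Int × Option Int) x =>
        let run := if some x == st.2.2 then st.2.1 + 1 else 1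
        (if run > st.1 then run else st.1, run, some x)) = pvStep := rfl
  rw [hfun]
  obtain ⟨-, hinv⟩ := pvScanInv _ hpw
  obtain ⟨p, -, -, -, -, hbestle, w, hwmem, hw⟩ := hinv hsnil
  have hbest_eq : ((PySem.List.sorted arr (fun x => x) false).foldl pvStep (0, 0, none)).1
      = (arr.count m : Int) := by
    apply le_antisymm
    · rw [hw, hperm.count_eq]
      exact hmmax w ((PySem.List.mem_sorted _ _ _ _).mp hwmem)
    · have := hbestle m ((PySem.List.mem_sorted _ _ _ _).mpr hmmem)
      rwa [hperm.count_eq] at this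
  rw [hbest_eq]
  have hcle : arr.count m ≤ arr.length := List.count_le_length
  push_cast [Nat.cast_sub hcle]
  ring
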